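-- pv_equiv track=rewrite | github.com/asnar00/zeta | ziz/output/parser.zero.py | task_bracket_depth_of_matching__char__string
-- ===== SOURCE A (Python) =====
-- def task_bracket_depth_of_matching__char__string(c_arr: str, pair: str):
--     d = 0
--     for c in c_arr:
--         if c == pair[0]:
--             d = d + 1
--         elif c == pair[1]:
--             d = d - 1
--         yield d
-- ===== SOURCE B (Python) =====
-- def task_bracket_depth_of_matching__char__string(c_arr: str, pair: str):
--     def gen():
--         # staged passes: collect positions of opening / closing characters
--         opens = [i for i, c in enumerate(c_arr) if c == pair[0]]
--         closes = [i for i, c in enumerate(c_arr) if c != pair[0] and c == pair[1]]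
--         # counting merge over positions: depth at i = (#opens <= i) - (#closes <= i)
--         j = k = 0
--         for i in range(len(c_arr)):
--             if j < len(opens) and opens[j] == i:
--                 j += 1
--             if k < len(closes) and closes[k] == i:
--                 k += 1
--             yield j - k
--     return gen()
-- ===== Notes on version B (the rewrite author's own statement) =====
-- stated objective: alternative
-- what changed: Replaces the running +/-1 counter over characters with two staged index-collecting passes (positions of opening and of closing chars) followed by a two-pointer counting merge that emits depth at i as (#opens<=i)-(#closes<=i).
import Mathlib
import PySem

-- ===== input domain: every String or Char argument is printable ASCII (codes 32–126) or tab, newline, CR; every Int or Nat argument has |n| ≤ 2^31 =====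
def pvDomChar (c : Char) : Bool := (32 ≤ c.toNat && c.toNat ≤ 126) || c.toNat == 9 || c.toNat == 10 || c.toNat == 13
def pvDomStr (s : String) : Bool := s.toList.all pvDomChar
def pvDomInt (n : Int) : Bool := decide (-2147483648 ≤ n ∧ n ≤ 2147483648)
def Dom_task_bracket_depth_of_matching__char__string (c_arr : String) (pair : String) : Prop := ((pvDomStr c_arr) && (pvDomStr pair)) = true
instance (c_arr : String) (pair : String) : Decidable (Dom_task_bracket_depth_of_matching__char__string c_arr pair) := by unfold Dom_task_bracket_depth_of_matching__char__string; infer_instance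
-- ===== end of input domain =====

-- B replaces A's running +/-1 counter with staged index-collecting passes plus a two-pointer
-- counting merge (depth at i = #opens<=i minus #closes<=i); no speed claim.

-- ===== PORT A =====
-- A: d starts at 0; for each char, d += 1 if c == pair[0], d -= 1 elif c == pair[1]; yield d.
-- pair[0]/pair[1] are total here via getD; Pre_ guarantees Python never hits the defaults.
def task_bracket_depth_of_matching__char__string (c_arr : String) (pair : String) : List Int :=
  (c_arr.toList.foldl
    (fun (st : Int × List Int) c =>
      let d : Int :=
        if c = pair.toList.getD 0 ' ' then st.1 + 1
        else if c = pair.toList.getD 1 ' ' then st.1 - 1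
        else st.1
      (d, st.2 ++ [d]))
    (0, [])).2

-- ===== PORT B =====
-- the two comprehensions: indices i (starting at i0) whose char satisfies p
def pvIdxs (p : Char → Bool) : Nat → List Char → List Nat
  | _, [] => []
  | i, c :: cs => if p c then i :: pvIdxs p (i + 1) cs else pvIdxs p (i + 1) cs

-- the 'for i in range(n)' merge loop; the pointers j/k into opens/closes are represented by
-- the remaining suffix of each list ('opens[j] == i' ⇔ the head of the remaining list is i)
-- together with the counts j,k that are yielded.
def pvMerge (fuel i : Nat) (opens closes : List Nat) (j k : Int) : List Int :=
  match fuel with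
  | 0 => []
  | f + 1 =>
    let (opens', j') := match opens with
      | o :: rest => if o = i then (rest, j + 1) else (o :: rest, j)
      | [] => ([], j)
    let (closes', k') := match closes with
      | o :: rest => if o = i then (rest, k + 1) else (o :: rest, k)
      | [] => ([], k)
    (j' - k') :: pvMerge f (i + 1) opens' closes' j' k'

def task_bracket_depth_of_matching__char__string_alt (c_arr : String) (pair : String) : List Int :=
  let l := c_arr.toList
  let opens := pvIdxs (fun c => c = pair.toList.getD 0 ' ') 0 l
  let closes := pvIdxs (fun c => ¬ c = pair.toList.getD 0 ' ' ∧ c = pair.toList.getD 1 ' ') 0 l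
  pvMerge l.length 0 opens closes 0 0

-- ===== PRECONDITION & SPEC =====
-- Pre_ excludes exactly the inputs where the Python A raises IndexError: some character needs
-- pair[0] with pair empty, or pair[1] (lazily, only when c != pair[0]) with pair of length < 2.
def Pre_task_bracket_depth_of_matching__char__string (c_arr : String) (pair : String) : Prop :=
  (c_arr.toList.all fun c => !pair.toList.isEmpty && (c == pair.toList.getD 0 ' ' || 2 ≤ pair.toList.length)) = true
instance (c_arr : String) (pair : String) : Decidable (Pre_task_bracket_depth_of_matching__char__string c_arr pair) := by unfold Pre_task_bracket_depth_of_matching__char__string; infer_instance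

def pvWitness_task_bracket_depth_of_matching__char__string : String × String := ("(a)b()", "()")

def Spec_task_bracket_depth_of_matching__char__string (c_arr : String) (pair : String) (out : List Int) : Prop := out = task_bracket_depth_of_matching__char__string_alt c_arr pair
instance (c_arr : String) (pair : String) (out : List Int) : Decidable (Spec_task_bracket_depth_of_matching__char__string c_arr pair out) := by unfold Spec_task_bracket_depth_of_matching__char__string; infer_instance

-- ===== CLAIM =====
def Claim_equal_task_bracket_depth_of_matching__char__string : Prop := ∀ (c_arr : String) (pair : String), Dom_task_bracket_depth_of_matching__char__string c_arr pair → Pre_task_bracket_depth_of_matching__char__string c_arr pair → Spec_task_bracket_depth_of_matching__char__string c_arr pair (task_bracket_depth_of_matching__char__string c_arr pair)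

-- ===== LEMMAS AND PROOFS =====
-- proof-side middle form: running prefix sums of per-char deltas
def pvDelta (pair : String) (c : Char) : Int :=
  if c = pair.toList.getD 0 ' ' then 1
  else if c = pair.toList.getD 1 ' ' then -1
  else 0

def pvScan (total : Int) : List Int → List Int
  | [] => []
  | x :: xs => (total + x) :: pvScan (total + x) xs

-- A's loop over l from state (d, acc) appends exactly the prefix sums of the deltas from d.
theorem pvFold_eq_scan (pair : String) (l : List Char) (d : Int) (acc : List Int) :
    (l.foldl
      (fun (st : Int × List Int) c =>
        let e : Int :=
          if c = pair.toList.getD 0 ' ' then st.1 + 1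
          else if c = pair.toList.getD 1 ' ' then st.1 - 1
          else st.1
        (e, st.2 ++ [e]))
      (d, acc)).2 = acc ++ pvScan d (l.map (pvDelta pair)) := by
  induction l generalizing d acc with
  | nil => simp [pvScan]
  | cons c l ih =>
    simp only [List.foldl_cons, List.map_cons, pvScan]
    rw [ih]
    simp only [pvDelta]
    split_ifs <;> simp <;> ring_nf <;> simp

-- every index collected from start i is ≥ i
theorem pvIdxs_ge (p : Char → Bool) (l : List Char) (i x : Nat) (h : x ∈ pvIdxs p i l) : i ≤ x := by
  induction l generalizing i with
  | nil => simp [pvIdxs] at h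
  | cons c cs ih =>
    simp only [pvIdxs] at h
    split at h
    · rcases List.mem_cons.1 h with h | h
      · omega
      · have := ih (i + 1) h; omega
    · have := ih (i + 1) h; omega

theorem pvIdxs_cons (p : Char → Bool) (c : Char) (cs : List Char) (i : Nat) :
    pvIdxs p i (c :: cs) = (if p c then [i] else []) ++ pvIdxs p (i + 1) cs := by
  by_cases h : p c <;> simp [pvIdxs, h]

-- popping the head of a pointer list whose genuine entries are all > i
theorem pvPop (i : Nat) (j : Int) (b : Bool) (O : List Nat) (hO : ∀ x ∈ O, i + 1 ≤ x) :
    (match (if b then [i] else []) ++ O with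
      | o :: rest => if o = i then (rest, j + 1) else (o :: rest, j)
      | [] => ([], j)) = (O, if b then j + 1 else j) := by
  cases b
  · cases O with
    | nil => rfl
    | cons o rest =>
      have : ¬ o = i := by have := hO o (by simp); omega
      simp [this]
  · simp

-- one step of the merge loop, with the current-index entries made explicit
theorem pvMerge_step (f i : Nat) (O C : List Nat) (bO bC : Bool) (j k : Int)
    (hO : ∀ x ∈ O, i + 1 ≤ x) (hC : ∀ x ∈ C, i + 1 ≤ x) :
    pvMerge (f + 1) i ((if bO then [i] else []) ++ O) ((if bC then [i] else []) ++ C) j k =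
      ((if bO then j + 1 else j) - (if bC then k + 1 else k)) ::
        pvMerge f (i + 1) O C (if bO then j + 1 else j) (if bC then k + 1 else k) := by
  show (_ :: _ : List Int) = _
  rw [pvPop i j bO O hO, pvPop i k bC C hC]

-- B's merge over the index lists of l starting at i equals the prefix-sum scan from j - k.
theorem pvMerge_eq_scan (pair : String) (l : List Char) (i : Nat) (j k : Int) :
    pvMerge l.length i
      (pvIdxs (fun c => c = pair.toList.getD 0 ' ') i l)
      (pvIdxs (fun c => ¬ c = pair.toList.getD 0 ' ' ∧ c = pair.toList.getD 1 ' ') i l)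
      j k = pvScan (j - k) (l.map (pvDelta pair)) := by
  induction l generalizing i j k with
  | nil => simp [pvMerge, pvScan]
  | cons c cs ih =>
    rw [List.length_cons, pvIdxs_cons, pvIdxs_cons,
      pvMerge_step _ _ _ _ _ _ _ _
        (fun x h => pvIdxs_ge _ cs (i + 1) x h) (fun x h => pvIdxs_ge _ cs (i + 1) x h)]
    simp only [List.map_cons, pvScan]
    by_cases h1 : c = pair.toList.getD 0 ' '
    · have e1 : (decide (c = pair.toList.getD 0 ' ')) = true := decide_eq_true h1
      have e2 : ¬ ((decide (¬ c = pair.toList.getD 0 ' ' ∧ c = pair.toList.getD 1 ' ')) = true) :=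
        fun h => (of_decide_eq_true h).1 h1
      rw [if_pos e1, if_neg e2, ih, show pvDelta pair c = 1 from by simp only [pvDelta, if_pos h1],
        show j + 1 - k = j - k + 1 from by ring]
    · by_cases h2 : c = pair.toList.getD 1 ' '
      · have e1 : ¬ ((decide (c = pair.toList.getD 0 ' ')) = true) :=
          fun h => h1 (of_decide_eq_true h)
        have e2 : (decide (¬ c = pair.toList.getD 0 ' ' ∧ c = pair.toList.getD 1 ' ')) = true :=
          decide_eq_true ⟨h1, h2⟩
        rw [if_neg e1, if_pos e2, ih,
          show pvDelta pair c = -1 from by simp only [pvDelta, if_neg h1, if_pos h2],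
          show j - (k + 1) = j - k + -1 from by ring]
      · have e1 : ¬ ((decide (c = pair.toList.getD 0 ' ')) = true) :=
          fun h => h1 (of_decide_eq_true h)
        have e2 : ¬ ((decide (¬ c = pair.toList.getD 0 ' ' ∧ c = pair.toList.getD 1 ' ')) = true) :=
          fun h => h2 (of_decide_eq_true h).2
        rw [if_neg e1, if_neg e2, ih,
          show pvDelta pair c = 0 from by simp only [pvDelta, if_neg h1, if_neg h2],
          show j - k + (0 : Int) = j - k from by ring]

-- ===== VERDICT =====
theorem task_bracket_depth_of_matching__char__string_spec : Claim_equal_task_bracket_depth_of_matching__char__string := by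
  intro c_arr pair _ _
  show _ = _
  unfold task_bracket_depth_of_matching__char__string task_bracket_depth_of_matching__char__string_alt
  rw [pvFold_eq_scan]
  simp only [List.nil_append]
  rw [pvMerge_eq_scan]
  norm_num
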